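-- pv_equiv track=rewrite | github.com/Kamalabot/HowCompetitive | solution_code/Lifeguards.py | max_time
-- ===== SOURCE A (Python) =====
-- from typing import List
--
-- def max_time(guard_time: List[List[int]]) -> int:
--
--     """This function takes in the guard times and returns the maximum time
--     that can be still covered."""
--
--     time_slot = []
--
--     for times in guard_time:
--
--         x = times[-1] - times[0]
--
--         time_slot.append(x)
--
--     #Remove the minimum time slot or search for the longer slots??
--
--     min_guard = min(time_slot)
--
--     #based on the min slot, the guard to be fired is found.
--     guard = guard_time[time_slot.index(min_guard)]
--
--     time_slot.pop(time_slot.index(min_guard))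
--
--     return sum(time_slot)
-- ===== SOURCE B (Python) =====
-- def max_time(guard_time):
--     total = 0
--     smallest = None
--     for times in guard_time:
--         d = times[-1] - times[0]
--         total += d
--         if smallest is None or d < smallest:
--             smallest = d
--     if smallest is None:
--         raise ValueError("max_time() arg is an empty sequence")
--     return total - smallest
-- ===== Notes on version B (the rewrite author's own statement) =====
-- stated objective: simpler
-- what changed: Single pass keeping a running sum and running minimum of slot durations instead of building the duration list and then scanning it with min/index/pop/sum.
-- outside the precondition, e.g. on max_time([]): A raises ValueError, B raises ValueError; on max_time([[1, 2], []]): A raises IndexError, B raises IndexError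
import Mathlib
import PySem

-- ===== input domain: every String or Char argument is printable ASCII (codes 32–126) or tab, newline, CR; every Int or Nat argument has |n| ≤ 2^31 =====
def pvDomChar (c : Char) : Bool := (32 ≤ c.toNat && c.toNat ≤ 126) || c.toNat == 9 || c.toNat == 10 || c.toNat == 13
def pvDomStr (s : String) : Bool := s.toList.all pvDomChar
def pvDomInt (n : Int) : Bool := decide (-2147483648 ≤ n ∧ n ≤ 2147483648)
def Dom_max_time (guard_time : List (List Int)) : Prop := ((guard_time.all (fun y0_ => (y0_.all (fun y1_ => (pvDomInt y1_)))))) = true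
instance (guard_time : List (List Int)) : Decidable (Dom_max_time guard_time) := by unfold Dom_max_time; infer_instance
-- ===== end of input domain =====

-- B is a single pass (running sum + running minimum of slot durations) instead of
-- building the duration list and re-scanning it with min/index/pop/sum.

-- ===== PORT A =====
-- times[-1] - times[0]; Pre_ guarantees both indices are in range, so .getD 0 is never taken
def pvDurA (times : List Int) : Int :=
  (PySem.List.pyGet? times (-1)).getD 0 - (PySem.List.pyGet? times 0).getD 0

def max_time (guard_time : List (List Int)) : Int :=
  let time_slot := guard_time.foldl (fun acc times => acc ++ [pvDurA times]) []
  match PySem.List.min? time_slot (fun x => x) with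
  | none => 0   -- min([]) raises ValueError; excluded by Pre_
  | some min_guard =>
    match PySem.List.index? time_slot min_guard with
    | none => 0 -- unreachable: min_guard ∈ time_slot
    | some i =>
      let _guard := PySem.List.pyGet? guard_time (i : Int)  -- computed and unused, as in A
      match PySem.List.pop? time_slot (i : Int) with
      | none => 0 -- unreachable
      | some r => r.2.sum

-- ===== PORT B =====
def max_time_alt (guard_time : List (List Int)) : Int :=
  let st := guard_time.foldl
    (fun (p : Int × Option Int) times =>
      let d := (PySem.List.pyGet? times (-1)).getD 0 - (PySem.List.pyGet? times 0).getD 0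
      (p.1 + d,
        match p.2 with
        | none => some d
        | some s => if d < s then some d else some s))
    (0, none)
  match st.2 with
  | none => 0   -- empty input: B raises ValueError; excluded by Pre_
  | some s => st.1 - s

-- ===== PRECONDITION & SPEC =====
-- A raises ValueError on an empty list (min([])) and IndexError when some sub-list is
-- empty (times[-1]); exactly those inputs are excluded.
def Pre_max_time (guard_time : List (List Int)) : Prop :=
  guard_time ≠ [] ∧ ∀ l ∈ guard_time, l ≠ []
instance (guard_time : List (List Int)) : Decidable (Pre_max_time guard_time) := by
  unfold Pre_max_time; infer_instance

def pvWitness_max_time : List (List Int) := [[1, 4], [2, 3, 9]]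

def Spec_max_time (guard_time : List (List Int)) (out : Int) : Prop := out = max_time_alt guard_time
instance (guard_time : List (List Int)) (out : Int) : Decidable (Spec_max_time guard_time out) := by unfold Spec_max_time; infer_instance

-- ===== CLAIM (what is proved, stated in full; the proofs are below) =====
def Claim_equal_max_time : Prop := ∀ (guard_time : List (List Int)), Dom_max_time guard_time → Pre_max_time guard_time → Spec_max_time guard_time (max_time guard_time)

-- ===== LEMMAS AND PROOFS =====

-- the append-accumulator loop of A builds the map of durations
theorem pvFoldlAppend (gt : List (List Int)) (acc : List Int) :
    gt.foldl (fun acc times => acc ++ [pvDurA times]) acc = acc ++ gt.map pvDurA := by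
  induction gt generalizing acc with
  | nil => simp
  | cons g gs ih => simp [List.foldl_cons, ih]

-- removing the first occurrence of m (a member) subtracts m from the sum
theorem pvPopSum (xs : List Int) (m : Int) (hm : m ∈ xs) :
    ∃ k, PySem.List.index? xs m = some k ∧
      ∃ r, PySem.List.pop? xs (k : Int) = some r ∧ r.2.sum = xs.sum - m := by
  obtain ⟨k, hk⟩ := Option.isSome_iff_exists.mp ((PySem.List.index?_isSome_iff (xs := xs) (v := m)).mpr hm)
  refine ⟨k, hk, ?_⟩
  obtain ⟨pre, suf, hxs, hlen, _⟩ := (PySem.List.index?_eq_some_iff xs m k).mp hk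
  have hklt : k < xs.length := by
    subst hxs; rw [List.length_append, List.length_cons]; omega
  refine ⟨_, PySem.List.pop?_natCast xs k hklt, ?_⟩
  subst hxs
  have : (pre ++ m :: suf).eraseIdx k = pre ++ suf := by
    rw [← hlen, List.eraseIdx_append_of_length_le (le_refl pre.length)]
    simp
  simp [this]
  try ring

-- B's loop invariant, once started
theorem pvBFold (gt : List (List Int)) (tot s : Int) :
    gt.foldl
      (fun (p : Int × Option Int) times =>
        let d := (PySem.List.pyGet? times (-1)).getD 0 - (PySem.List.pyGet? times 0).getD 0
        (p.1 + d,
          match p.2 with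
          | none => some d
          | some s => if d < s then some d else some s))
      (tot, some s)
    = (tot + (gt.map pvDurA).sum, some ((gt.map pvDurA).foldl min s)) := by
  induction gt generalizing tot s with
  | nil => simp
  | cons g gs ih =>
    rw [List.foldl_cons]
    have hstep :
        ((tot + ((PySem.List.pyGet? g (-1)).getD 0 - (PySem.List.pyGet? g 0).getD 0),
          (if ((PySem.List.pyGet? g (-1)).getD 0 - (PySem.List.pyGet? g 0).getD 0) < s then
            some ((PySem.List.pyGet? g (-1)).getD 0 - (PySem.List.pyGet? g 0).getD 0)
          else some s)) : Int × Option Int)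
        = (tot + pvDurA g, some (min s (pvDurA g))) := by
      simp only [pvDurA]
      congr 1
      by_cases h : ((PySem.List.pyGet? g (-1)).getD 0 - (PySem.List.pyGet? g 0).getD 0) < s
      · simp [h, le_of_lt h]
      · simp [h, not_lt.mp h]
    simp only []
    rw [hstep, ih]
    simp [List.foldl_cons]
    ring

theorem pvBEq (g : List Int) (gs : List (List Int)) :
    max_time_alt (g :: gs)
      = (pvDurA g + (gs.map pvDurA).sum) - (gs.map pvDurA).foldl min (pvDurA g) := by
  simp only [max_time_alt, List.foldl_cons, pvDurA]
  rw [show ((0 : Int) + ((PySem.List.pyGet? g (-1)).getD 0 - (PySem.List.pyGet? g 0).getD 0))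
      = pvDurA g from by simp [pvDurA]]
  rw [pvBFold]
  simp [pvDurA]

theorem pvAEq (g : List Int) (gs : List (List Int)) :
    max_time (g :: gs)
      = (pvDurA g + (gs.map pvDurA).sum) - (gs.map pvDurA).foldl min (pvDurA g) := by
  have hts : (g :: gs).foldl (fun acc times => acc ++ [pvDurA times]) ([] : List Int)
      = pvDurA g :: gs.map pvDurA := by
    rw [pvFoldlAppend]; simp
  set m := (gs.map pvDurA).foldl min (pvDurA g) with hm
  have hmin : PySem.List.min? (pvDurA g :: gs.map pvDurA) (fun x => x) = some m := by
    rw [hm]; exact PySem.List.min?_id_cons _ _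
  have hmem : m ∈ pvDurA g :: gs.map pvDurA := PySem.List.min?_mem hmin
  obtain ⟨k, hk, r, hr, hsum⟩ := pvPopSum _ m hmem
  simp only [max_time, hts, hmin, hk, hr, hsum]
  simp

-- ===== VERDICT (by name: the statement is the Claim_ definition above) =====
theorem max_time_spec : Claim_equal_max_time := by
  intro guard_time _ hpre
  unfold Spec_max_time
  obtain ⟨hne, _⟩ := hpre
  cases guard_time with
  | nil => exact absurd rfl hne
  | cons g gs => rw [pvAEq, pvBEq]
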